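-- pv_equiv track=rewrite | github.com/genevrahenrike/subreddit-scrapper | scripts/generate_custom_jobs.py | split_alphabetically
-- ===== SOURCE A (Python) =====
-- def split_alphabetically(subs_dict, num_splits):
--     """Split subreddits alphabetically."""
--     sorted_subs = sorted(subs_dict.keys())
--     chunk_size = len(sorted_subs) // num_splits
--     remainder = len(sorted_subs) % num_splits
--
--     chunks = []
--     start = 0
--     for i in range(num_splits):
--         size = chunk_size + (1 if i < remainder else 0)
--         end = start + size
--         chunk = sorted_subs[start:end]
--         chunks.append(chunk)
--         start = end
--
--     return chunks
-- ===== SOURCE B (Python) =====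
-- def split_alphabetically(subs_dict, num_splits):
--     """Split subreddits alphabetically."""
--     rest = sorted(subs_dict)
--     chunks = []
--     k = num_splits
--     while k > 0:
--         size = len(rest) // k  # the last of k balanced chunks is the smallest
--         chunks.append(rest[len(rest) - size:])
--         del rest[len(rest) - size:]
--         k -= 1
--     chunks.reverse()
--     return chunks
-- ===== Notes on version B (the rewrite author's own statement) =====
-- stated objective: alternative
-- what changed: Instead of A's chunk_size/remainder precomputation and left-to-right indexed start/end slicing over range(num_splits), B builds the chunks back-to-front: a consuming loop repeatedly peels the floor(len(rest)/k)-sized chunk off the END of the sorted list (in-place truncation) for k = num_splits..1 and reverses the chunk list at the end; Pre_ excludes num_splits == 0, where A raises ZeroDivisionError.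
import Mathlib
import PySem

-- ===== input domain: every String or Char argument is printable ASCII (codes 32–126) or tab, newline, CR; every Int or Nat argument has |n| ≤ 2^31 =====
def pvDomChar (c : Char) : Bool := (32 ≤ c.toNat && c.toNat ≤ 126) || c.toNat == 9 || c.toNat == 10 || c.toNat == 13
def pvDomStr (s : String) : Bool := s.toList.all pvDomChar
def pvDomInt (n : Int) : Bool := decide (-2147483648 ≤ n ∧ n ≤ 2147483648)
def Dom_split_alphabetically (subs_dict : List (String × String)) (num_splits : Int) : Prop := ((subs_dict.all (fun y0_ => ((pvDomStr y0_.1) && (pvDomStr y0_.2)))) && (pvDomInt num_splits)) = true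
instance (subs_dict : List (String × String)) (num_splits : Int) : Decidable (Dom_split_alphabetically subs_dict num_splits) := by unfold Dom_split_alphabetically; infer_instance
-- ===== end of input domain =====

-- B replaces A's chunk_size/remainder arithmetic and indexed start/end slicing loop with a
-- back-to-front construction: peel the floor(len(rest)/k)-sized chunk off the end of the
-- sorted list for k = num_splits..1, then reverse the chunk list.

-- ===== PORT A =====
def split_alphabetically (subs_dict : List (String × String)) (num_splits : Int) : List (List String) :=
  let sorted_subs := PySem.List.sorted (PySem.Dict.ofList subs_dict).keys (fun x => x) false
  let chunk_size := PySem.Int.floordiv (sorted_subs.length : Int) num_splits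
  let remainder := PySem.Int.mod (sorted_subs.length : Int) num_splits
  let st := (PySem.List.pyRange 0 num_splits 1).foldl
    (fun (s : List (List String) × Int) i =>
      let size := chunk_size + (if i < remainder then 1 else 0)
      let e := s.2 + size
      let chunk := PySem.List.slice sorted_subs (some s.2) (some e)
      (s.1 ++ [chunk], e))
    ([], 0)
  st.1

-- ===== PORT B =====
-- Source B's while loop over the state (rest, chunks, k): peel the floor-sized chunk off the END,
-- truncate rest in place (del rest[len-size:] -> take), append, finally reverse the chunk list
def pvTakeChunks (rest : List String) (chunks : List (List String)) (k : Int) : List (List String) :=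
  if _h : k > 0 then
    let size := PySem.Int.floordiv (rest.length : Int) k
    pvTakeChunks (PySem.List.slice rest none (some ((rest.length : Int) - size)))
      (chunks ++ [PySem.List.slice rest (some ((rest.length : Int) - size)) none]) (k - 1)
  else chunks
termination_by k.toNat
decreasing_by omega

def split_alphabetically_alt (subs_dict : List (String × String)) (num_splits : Int) : List (List String) :=
  (pvTakeChunks (PySem.List.sorted (PySem.Dict.ofList subs_dict).keys (fun x => x) false) [] num_splits).reverse

-- ===== PRECONDITION & SPEC =====
-- Pre_ excludes exactly num_splits == 0, where Python A raises ZeroDivisionError.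
def Pre_split_alphabetically (subs_dict : List (String × String)) (num_splits : Int) : Prop := num_splits ≠ 0
instance (subs_dict : List (String × String)) (num_splits : Int) : Decidable (Pre_split_alphabetically subs_dict num_splits) := by unfold Pre_split_alphabetically; infer_instance
def pvWitness_split_alphabetically : (List (String × String)) × Int := ([("a", "x"), ("b", "y"), ("c", "z")], 2)

def Spec_split_alphabetically (subs_dict : List (String × String)) (num_splits : Int) (out : List (List String)) : Prop := out = split_alphabetically_alt subs_dict num_splits
instance (subs_dict : List (String × String)) (num_splits : Int) (out : List (List String)) : Decidable (Spec_split_alphabetically subs_dict num_splits out) := by unfold Spec_split_alphabetically; infer_instance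

-- ===== CLAIM =====
def Claim_equal_split_alphabetically : Prop := ∀ (subs_dict : List (String × String)) (num_splits : Int), Dom_split_alphabetically subs_dict num_splits → Pre_split_alphabetically subs_dict num_splits → Spec_split_alphabetically subs_dict num_splits (split_alphabetically subs_dict num_splits)

-- ===== LEMMAS AND PROOFS =====

-- A's boundary in closed form
def pvBnd (cs r i : Int) : Int := i * cs + min i r

-- the same boundary at the Nat level
def bndN (n k i : Nat) : Nat := i * (n / k) + min i (n % k)

theorem pvBnd_succ (cs r i : Int) : pvBnd cs r (i + 1) = pvBnd cs r i + (cs + (if i < r then 1 else 0)) := by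
  unfold pvBnd
  split_ifs with h <;> rw [min_def, min_def] <;> split_ifs <;> ring_nf <;> omega

-- A's fold, characterised by the boundary function
theorem pvFoldA (s : List String) (cs r : Int) :
    ∀ (k : Nat) (a : Int) (acc : List (List String)),
    (PySem.List.pyRange a (a + k) 1).foldl
      (fun (st : List (List String) × Int) i =>
        let size := cs + (if i < r then 1 else 0)
        let e := st.2 + size
        let chunk := PySem.List.slice s (some st.2) (some e)
        (st.1 ++ [chunk], e))
      (acc, pvBnd cs r a)
    = (acc ++ (PySem.List.pyRange a (a + k) 1).map
        (fun i => PySem.List.slice s (some (pvBnd cs r i)) (some (pvBnd cs r (i + 1)))),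
       pvBnd cs r (a + k)) := by
  intro k
  induction k with
  | zero =>
    intro a acc
    rw [PySem.List.pyRange_one_eq_nil (by omega)]
    simp
  | succ k ih =>
    intro a acc
    rw [PySem.List.pyRange_one_cons (by omega : a < a + (k + 1 : Nat))]
    simp only [List.foldl_cons, List.map_cons]
    rw [show a + (k + 1 : Nat) = (a + 1) + (k : Nat) by push_cast; ring] at *
    rw [show pvBnd cs r a + (cs + (if a < r then 1 else 0)) = pvBnd cs r (a + 1) from (pvBnd_succ cs r a).symm]
    rw [ih (a + 1) (acc ++ [PySem.List.slice s (some (pvBnd cs r a)) (some (pvBnd cs r (a + 1)))])]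
    simp

-- index-monotonicity of the boundary
theorem bndN_mono (n k i j : Nat) (h : i ≤ j) : bndN n k i ≤ bndN n k j := by
  unfold bndN
  have := Nat.mul_le_mul_right (n / k) h
  omega

-- the last boundary is the whole length
theorem bndN_last (n k : Nat) : bndN n (k + 1) (k + 1) = n := by
  have hQR := Nat.div_add_mod n (k + 1)
  have hR : n % (k + 1) < k + 1 := Nat.mod_lt _ (by omega)
  unfold bndN
  omega

-- the next-to-last boundary: the last chunk has the floor size
theorem bndN_penult (n k : Nat) : bndN n (k + 1) k = n - n / (k + 1) := by
  have hQR := Nat.div_add_mod n (k + 1)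
  have hR : n % (k + 1) < k + 1 := Nat.mod_lt _ (by omega)
  have hexp : (k + 1) * (n / (k + 1)) = k * (n / (k + 1)) + n / (k + 1) := by ring
  unfold bndN
  omega

-- boundaries of the truncated prefix agree with the parent's boundaries
theorem bndN_take (n k j : Nat) (hk : 0 < k) (hj : j ≤ k) :
    bndN (bndN n (k + 1) k) k j = bndN n (k + 1) j := by
  have hQR := Nat.div_add_mod n (k + 1)
  have hR : n % (k + 1) < k + 1 := Nat.mod_lt _ (by omega)
  set q := n / (k + 1) with hq
  set r := n % (k + 1) with hrdef
  have hval : bndN n (k + 1) k = k * q + r := by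
    unfold bndN; rw [← hq, ← hrdef]; omega
  rcases Nat.lt_or_ge r k with hlt | hge
  · have hcomm : k * q + r = r + k * q := by ring
    have hdiv : (k * q + r) / k = q := by
      rw [hcomm, Nat.add_mul_div_left _ _ hk, Nat.div_eq_of_lt hlt, Nat.zero_add]
    have hmod : (k * q + r) % k = r := by
      rw [hcomm, Nat.add_mul_mod_self_left, Nat.mod_eq_of_lt hlt]
    rw [hval]
    unfold bndN
    rw [hdiv, hmod, ← hq, ← hrdef]
  · have hrk : r = k := by omega
    have hval2 : bndN n (k + 1) k = (q + 1) * k := by rw [hval, hrk]; ring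
    have hdiv : ((q + 1) * k) / k = q + 1 := Nat.mul_div_cancel _ hk
    have hmod : ((q + 1) * k) % k = 0 := Nat.mul_mod_left _ _
    rw [hval2]
    unfold bndN
    rw [hdiv, hmod, ← hq, ← hrdef]
    have hexp : j * (q + 1) = j * q + j := by ring
    omega

-- B's loop, characterised by the same boundaries (chunks are produced back-to-front)
theorem pvChunksB : ∀ (k : Nat) (s : List String) (acc : List (List String)),
    pvTakeChunks s acc (k : Int) =
    acc ++ ((List.range k).map (fun i =>
      (s.drop (bndN s.length k i)).take (bndN s.length k (i + 1) - bndN s.length k i))).reverse := by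
  intro k
  induction k with
  | zero =>
    intro s acc
    rw [pvTakeChunks, dif_neg (by omega : ¬ ((0 : Nat) : Int) > 0)]
    simp
  | succ k ih =>
    intro s acc
    rw [pvTakeChunks, dif_pos (by push_cast; omega : ((k + 1 : Nat) : Int) > 0)]
    simp only [PySem.Int.floordiv_natCast]
    have hqle : s.length / (k + 1) ≤ s.length := Nat.div_le_self _ _
    have hc : ((s.length : Int) - ((s.length / (k + 1) : Nat) : Int))
        = ((s.length - s.length / (k + 1) : Nat) : Int) := by omega
    rw [hc, PySem.List.slice_from_natCast, PySem.List.slice_to_natCast,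
        show ((k + 1 : Nat) : Int) - 1 = ((k : Nat) : Int) by push_cast; ring, ih]
    rw [List.range_succ, List.map_append, List.reverse_append]
    simp only [List.map_cons, List.map_nil, List.reverse_cons, List.reverse_nil,
               List.nil_append, List.cons_append, List.append_assoc]
    refine congrArg _ (congrArg₂ _ ?_ ?_)
    · rw [show s.length - s.length / (k + 1) = bndN s.length (k + 1) k from (bndN_penult s.length k).symm,
          bndN_last]
      rw [List.take_of_length_le (by rw [List.length_drop])]
    · refine congrArg _ (List.map_congr_left ?_)
      intro j hj
      rw [List.mem_range] at hj
      have hk : 0 < k := by omega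
      have hlen : (s.take (s.length - s.length / (k + 1))).length = bndN s.length (k + 1) k := by
        rw [List.length_take, bndN_penult]
        have := Nat.sub_le s.length (s.length / (k + 1))
        omega
      rw [hlen, bndN_take s.length k j hk (by omega), bndN_take s.length k (j + 1) hk (by omega)]
      rw [show s.length - s.length / (k + 1) = bndN s.length (k + 1) k from (bndN_penult s.length k).symm]
      rw [List.drop_take, List.take_take]
      congr 1
      have hm1 := bndN_mono s.length (k + 1) (j + 1) k (by omega)
      have hm2 := bndN_mono s.length (k + 1) j (j + 1) (by omega)
      omega

-- ===== VERDICT =====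
theorem split_alphabetically_spec : Claim_equal_split_alphabetically := by
  intro subs_dict num_splits _ hpre
  unfold Pre_split_alphabetically at hpre
  unfold Spec_split_alphabetically split_alphabetically split_alphabetically_alt
  dsimp only
  set s := PySem.List.sorted (PySem.Dict.ofList subs_dict).keys (fun x => x) false with hs
  set cs := PySem.Int.floordiv (s.length : Int) num_splits with hcs
  set r := PySem.Int.mod (s.length : Int) num_splits with hr
  by_cases hpos : 0 < num_splits
  · obtain ⟨k, hk⟩ : ∃ k : Nat, num_splits = (k : Int) := ⟨num_splits.toNat, by omega⟩
    have hkpos : 0 < k := by omega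
    have hr0 : 0 ≤ r := by rw [hr]; exact PySem.Int.mod_nonneg _ hpos
    have hb0 : pvBnd cs r 0 = 0 := by simp [pvBnd]; omega
    have hA := pvFoldA s cs r k 0 []
    simp only [zero_add] at hA
    rw [hb0] at hA
    rw [hk, hA, pvChunksB k s []]
    simp only [List.nil_append, List.reverse_reverse]
    rw [PySem.List.pyRange_one 0 (k : Int)]
    simp only [List.map_map, Int.sub_zero, Int.toNat_natCast]
    apply List.map_congr_left
    intro i _
    have hcsn : cs = (((s.length / k : Nat)) : Int) := by
      rw [hcs, hk, PySem.Int.floordiv_natCast]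
    have hrn : r = (((s.length % k : Nat)) : Int) := by
      rw [hr, hk, PySem.Int.mod_natCast]
    have hb1 : pvBnd cs r ((0 : Int) + (i : Int)) = ((bndN s.length k i : Nat) : Int) := by
      rw [hcsn, hrn]; unfold pvBnd bndN; push_cast; try ring_nf
    have hb2 : pvBnd cs r ((0 : Int) + (i : Int) + 1) = ((bndN s.length k (i + 1) : Nat) : Int) := by
      rw [hcsn, hrn]; unfold pvBnd bndN; push_cast; try ring_nf
    rw [Function.comp, hb1, hb2, PySem.List.slice_natCast]
  · rw [PySem.List.pyRange_one_eq_nil (by omega : num_splits ≤ 0)]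
    rw [pvTakeChunks, dif_neg (by omega : ¬ num_splits > 0)]
    simp
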